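-- pv_equiv track=rewrite | github.com/WestEastZ/codingTest | 프로그래머스/2/42586. 기능개발/기능개발.py | solution
-- ===== SOURCE A (Python) =====
-- from collections import deque
--
-- def solution(progresses, speeds):
--
--     answer = []
--     qu = deque()
--
--
--     for task, speed in zip(progresses, speeds):
--         task_count = 0
--
--         while task < 100:
--             task += speed
--             task_count += 1
--
--         qu.append(task_count)
--
--     while qu:
--         count = 1
--         day = qu.popleft()
--
--         while qu and day >= qu[0]:
--             qu.popleft()
--             count += 1
--         answer.append(count)
--
--     return answer
-- ===== SOURCE B (Python) =====
-- def solution(progresses, speeds):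
--     # Phase 1: remaining days per task by ceiling division instead of a day-by-day loop.
--     days = [0 if p >= 100 else -((p - 100) // s) for p, s in zip(progresses, speeds)]
--     # Phase 2: one pass grouping against the leader (first day of the current group).
--     answer = []
--     leader, count = 0, 0
--     for d in days:
--         if count == 0:
--             leader, count = d, 1
--         elif d <= leader:
--             count += 1
--         else:
--             answer.append(count)
--             leader, count = d, 1
--     if count:
--         answer.append(count)
--     return answer
-- ===== Notes on version B (the rewrite author's own statement) =====
-- stated objective: faster
-- what changed: Replaces the day-by-day while loop with a closed-form ceiling division per task and the deque popleft grouping with a single fold keeping a leader and running count.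
import Mathlib
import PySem

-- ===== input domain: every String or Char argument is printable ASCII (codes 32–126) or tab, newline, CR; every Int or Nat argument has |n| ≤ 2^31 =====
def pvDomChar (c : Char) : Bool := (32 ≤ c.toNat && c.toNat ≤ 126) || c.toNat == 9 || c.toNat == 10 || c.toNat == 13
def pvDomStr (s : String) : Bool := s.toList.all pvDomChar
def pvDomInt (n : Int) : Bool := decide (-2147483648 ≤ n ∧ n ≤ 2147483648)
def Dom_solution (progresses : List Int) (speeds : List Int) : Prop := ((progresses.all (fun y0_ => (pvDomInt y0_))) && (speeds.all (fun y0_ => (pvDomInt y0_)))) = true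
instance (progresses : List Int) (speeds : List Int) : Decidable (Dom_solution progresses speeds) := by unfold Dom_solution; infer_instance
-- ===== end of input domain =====

-- B replaces A's day-by-day simulation and deque popping with a closed-form ceiling
-- division per task and a single leader/count fold (return-value equivalence).

-- ===== PORT A =====
-- inner 'while task < 100: task += speed; task_count += 1'; the fuel only totalizes
-- the loop (with fuel (100 - task).toNat it performs exactly Python's iterations
-- whenever the Python loop terminates, i.e. speed > 0 or task ≥ 100).
def loopA (task speed count : Int) : Nat → Int
  | 0 => count
  | fuel + 1 => if task < 100 then loopA (task + speed) speed (count + 1) fuel else count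

-- inner 'while qu and day >= qu[0]' together with the restart of the outer while
def goA (day count : Int) : List Int → List Int
  | [] => [count]
  | x :: xs => if day ≥ x then goA day (count + 1) xs else count :: goA x 1 xs

-- outer 'while qu'
def groupA : List Int → List Int
  | [] => []
  | d :: rest => goA d 1 rest

def solution (progresses : List Int) (speeds : List Int) : List Int :=
  let qu := (progresses.zip speeds).foldl
    (fun q ts => q ++ [loopA ts.1 ts.2 0 (100 - ts.1).toNat]) []
  groupA qu

-- ===== PORT B =====
def stepB (st : List Int × Int × Int) (d : Int) : List Int × Int × Int :=
  if st.2.2 = 0 then (st.1, d, 1)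
  else if d ≤ st.2.1 then (st.1, st.2.1, st.2.2 + 1)
  else (st.1 ++ [st.2.2], d, 1)

def solution_alt (progresses : List Int) (speeds : List Int) : List Int :=
  let days := (progresses.zip speeds).map
    (fun ts => if ts.1 ≥ 100 then 0 else -(PySem.Int.floordiv (ts.1 - 100) ts.2))
  let st := days.foldl stepB ([], 0, 0)
  if st.2.2 ≠ 0 then st.1 ++ [st.2.2] else st.1

-- ===== PRECONDITION & SPEC =====
-- Pre_ excludes exactly the inputs where A's inner while never terminates
-- (an unfinished task with speed ≤ 0): Python A diverges there.
def Pre_solution (progresses : List Int) (speeds : List Int) : Prop :=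
  ∀ ts ∈ progresses.zip speeds, 100 ≤ ts.1 ∨ 0 < ts.2
instance (progresses : List Int) (speeds : List Int) : Decidable (Pre_solution progresses speeds) := by unfold Pre_solution; infer_instance
def pvWitness_solution : List Int × List Int := ([93, 30, 55], [1, 30, 5])

def Spec_solution (progresses : List Int) (speeds : List Int) (out : List Int) : Prop := out = solution_alt progresses speeds
instance (progresses : List Int) (speeds : List Int) (out : List Int) : Decidable (Spec_solution progresses speeds out) := by unfold Spec_solution; infer_instance

-- ===== CLAIM (what is proved, stated in full; the proofs are below) =====
def Claim_equal_solution : Prop := ∀ (progresses : List Int) (speeds : List Int), Dom_solution progresses speeds → Pre_solution progresses speeds → Spec_solution progresses speeds (solution progresses speeds)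

-- ===== LEMMAS AND PROOFS =====

theorem loopA_eq (s : Int) (hs : 0 < s) :
    ∀ (fuel : Nat) (task c : Int), 100 - task ≤ (fuel : Int) →
      loopA task s c fuel = c + max 0 (-((task - 100) / s)) := by
  intro fuel
  induction fuel with
  | zero =>
      intro task c h
      have h0 : 0 ≤ (task - 100) / s := Int.ediv_nonneg (by omega) (by omega)
      simp only [loopA]
      omega
  | succ n ih =>
      intro task c h
      simp only [loopA]
      by_cases ht : task < 100
      · simp only [ht, if_true]
        rw [ih (task + s) (c + 1) (by omega)]
        have hx : (task - 100) / s < 0 := by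
          by_contra hx
          have := (Int.le_ediv_iff_mul_le hs (a := 0) (b := task - 100)).mp (by omega)
          omega
        have hy : (task + s - 100) / s = (task - 100) / s + 1 := by
          have := Int.add_mul_ediv_right (task - 100) 1 (by omega : s ≠ 0)
          have harg : task + s - 100 = task - 100 + 1 * s := by ring
          rw [harg, this]
        omega
      · simp only [ht, if_false]
        have h0 : 0 ≤ (task - 100) / s := Int.ediv_nonneg (by omega) (by omega)
        omega

theorem day_eq (p s : Int) (h : 100 ≤ p ∨ 0 < s) :
    loopA p s 0 (100 - p).toNat =
      (if p ≥ 100 then 0 else -(PySem.Int.floordiv (p - 100) s)) := by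
  by_cases hp : 100 ≤ p
  · have : (100 - p).toNat = 0 := by omega
    rw [this]
    simp [loopA, hp]
  · have hs : 0 < s := by tauto
    rw [loopA_eq s hs _ p 0 (by omega)]
    have hx : (p - 100) / s < 0 := by
      by_contra hx
      have := (Int.le_ediv_iff_mul_le hs (a := 0) (b := p - 100)).mp (by omega)
      omega
    rw [PySem.Int.floordiv_eq_ediv_of_pos hs]
    simp only [ge_iff_le, hp, if_false]
    omega

theorem foldl_app (f : Int × Int → Int) :
    ∀ (l : List (Int × Int)) (acc : List Int),
      l.foldl (fun q ts => q ++ [f ts]) acc = acc ++ l.map f := by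
  intro l
  induction l with
  | nil => simp
  | cons x xs ih => intro acc; simp [List.foldl_cons, ih]

theorem group_eq :
    ∀ (l ans : List Int) (d c : Int), 1 ≤ c →
      (let st := l.foldl stepB (ans, d, c);
        if st.2.2 ≠ 0 then st.1 ++ [st.2.2] else st.1) = ans ++ goA d c l := by
  intro l
  induction l with
  | nil =>
      intro ans d c hc
      simp only [List.foldl_nil, goA]
      have : c ≠ 0 := by omega
      simp [this]
  | cons x xs ih =>
      intro ans d c hc
      simp only [List.foldl_cons, goA]
      have hc0 : c ≠ 0 := by omega
      by_cases hxd : x ≤ d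
      · have hstep : stepB (ans, d, c) x = (ans, d, c + 1) := by
          simp [stepB, hc0, hxd]
        rw [hstep, ih ans d (c + 1) (by omega)]
        simp [ge_iff_le, hxd]
      · have hstep : stepB (ans, d, c) x = (ans ++ [c], x, 1) := by
          simp [stepB, hc0, hxd]
        rw [hstep, ih (ans ++ [c]) x 1 (by omega)]
        simp [ge_iff_le, hxd]

-- ===== VERDICT (by name: the statement is the Claim_ definition above) =====
theorem solution_spec : Claim_equal_solution := by
  intro progresses speeds _ hpre
  unfold Spec_solution solution solution_alt
  rw [foldl_app]
  simp only [List.nil_append]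
  have hmap : (progresses.zip speeds).map (fun ts => loopA ts.1 ts.2 0 (100 - ts.1).toNat)
      = (progresses.zip speeds).map
          (fun ts => if ts.1 ≥ 100 then 0 else -(PySem.Int.floordiv (ts.1 - 100) ts.2)) := by
    apply List.map_congr_left
    intro ts hts
    exact day_eq ts.1 ts.2 (hpre ts hts)
  rw [hmap]
  generalize ((progresses.zip speeds).map
      (fun ts => if ts.1 ≥ 100 then 0 else -(PySem.Int.floordiv (ts.1 - 100) ts.2))) = days
  cases days with
  | nil => simp [groupA]
  | cons d rest =>
      have hfirst : stepB ([], 0, 0) d = ([], d, 1) := by simp [stepB]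
      simp only [groupA, List.foldl_cons, hfirst]
      exact (group_eq rest [] d 1 (by omega)).symm
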